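-- pv_equiv track=rewrite | github.com/Katja39/acceptor_learning | app.py | choose_generalization
-- ===== SOURCE A (Python) =====
-- def longest_common_prefix(words: list[str]) -> str:
--     if not words:
--         return ""
--     prefix = words[0]
--     for w in words[1:]:
--         while not w.startswith(prefix) and prefix:
--             prefix = prefix[:-1]
--         if not prefix:
--             break
--     return prefix
--
-- def longest_common_suffix(words: list[str]) -> str:
--     if not words:
--         return ""
--     suffix = words[0]
--     for w in words[1:]:
--         while not w.endswith(suffix) and suffix:
--             suffix = suffix[1:]
--         if not suffix:
--             break
--     return suffix
--
-- def longest_common_substring(words: list[str]) -> str: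
--     """
--     Longest contiguous substring shared by all words.
--     Brute-force over the shortest word; fine for small classroom examples.
--     """
--     if not words:
--         return ""
--     shortest = min(words, key=len)
--     n = len(shortest)
--     for length in range(n, 0, -1):
--         for start in range(n - length + 1):
--             cand = shortest[start : start + length]
--             if all(cand in w for w in words):
--                 return cand
--     return ""
--
-- def choose_generalization(words: list[str]) -> tuple[str, str] | None:
--     """
--     Decide which simple heuristic to use (suffix / prefix / contains substring).
--     Returns (mode, token) or None for 'exact'.
--     Tie‑break priority: suffix > prefix > contains, with longer token preferred.
--     """
--     # Heuristics only kick in with at least two non-empty examples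
--     if len(words) < 2 or any(len(w) == 0 for w in words):
--         return None
--
--     # Repeatedly seeing exactly the same word should stay exact
--     if len(set(words)) == 1:
--         return None
--
--     suffix = longest_common_suffix(words)
--     prefix = longest_common_prefix(words)
--     substring = longest_common_substring(words)
--
--     candidates = []
--     if suffix:
--         candidates.append(("suffix", suffix))
--     if prefix:
--         candidates.append(("prefix", prefix))
--     if substring and len(substring) >= 2:
--         candidates.append(("contains", substring))
--
--     if not candidates:
--         return None
--
--     priority = {"suffix": 2, "prefix": 1, "contains": 0}
--     return max(candidates, key=lambda c: (len(c[1]), priority[c[0]]))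
-- ===== SOURCE B (Python) =====
-- def _pref2(a: str, b: str) -> str:
--     i = 0
--     while i < len(a) and i < len(b) and a[i] == b[i]:
--         i += 1
--     return a[:i]
--
-- def _reduce_pref(ws: list[str]) -> str:
--     p = ws[0]
--     for w in ws[1:]:
--         p = _pref2(p, w)
--     return p
--
-- def _common_substring(words: list[str]) -> str:
--     # ascending length with set-intersection feasibility; stops at the first infeasible length
--     shortest = min(words, key=len)
--     n = len(shortest)
--     best = ""
--     for length in range(1, n + 1):
--         common = {shortest[s:s + length] for s in range(n - length + 1)}
--         for w in words:
--             common &= {w[s:s + length] for s in range(len(w) - length + 1)}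
--         pick = next((shortest[s:s + length] for s in range(n - length + 1)
--                      if shortest[s:s + length] in common), None)
--         if pick is None:
--             return best
--         best = pick
--     return best
--
-- def choose_generalization(words: list[str]) -> tuple[str, str] | None:
--     if len(words) < 2 or any(w == "" for w in words) or all(w == words[0] for w in words):
--         return None
--     suffix = _reduce_pref([w[::-1] for w in words])[::-1]
--     prefix = _reduce_pref(words)
--     substring = _common_substring(words)
--     best = None
--     for pri, mode, tok in ((2, "suffix", suffix), (1, "prefix", prefix), (0, "contains", substring)):
--         if tok != "" and (mode != "contains" or len(tok) >= 2):
--             if best is None or len(tok) > len(best[2]) or (len(tok) == len(best[2]) and pri > best[0]):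
--                 best = (pri, mode, tok)
--     return (best[1], best[2]) if best else None
-- ===== Notes on version B (the rewrite author's own statement) =====
-- stated objective: alternative
-- what changed: The longest-common-substring search now runs ascending over lengths with per-length substring-set intersection and stops at the first infeasible length (instead of descending brute force testing every candidate start against every word); common prefix is computed by a character-index scan (and the common suffix as the reversed common prefix of the reversed words) instead of repeatedly chopping a candidate; the final pick is a single accumulator scan instead of building a candidates list and calling max.
import Mathlib
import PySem

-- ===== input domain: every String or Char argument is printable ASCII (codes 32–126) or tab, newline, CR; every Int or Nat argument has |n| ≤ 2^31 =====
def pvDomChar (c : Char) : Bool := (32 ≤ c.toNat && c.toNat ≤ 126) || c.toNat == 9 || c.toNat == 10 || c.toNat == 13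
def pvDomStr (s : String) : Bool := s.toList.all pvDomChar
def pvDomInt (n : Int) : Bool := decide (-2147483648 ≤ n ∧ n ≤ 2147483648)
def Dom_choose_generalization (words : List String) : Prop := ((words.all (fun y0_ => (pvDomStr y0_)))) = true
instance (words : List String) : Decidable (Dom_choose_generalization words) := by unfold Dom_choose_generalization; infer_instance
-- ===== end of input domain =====

-- B: an alternative algorithm — ascending-length substring search with per-length substring-set
-- intersection and early stop (A scans lengths descending, testing every candidate against every
-- word), char-scan common prefix (suffix = reversed prefix of reversed words), single selection scan.


-- ===== PORT A =====

-- while not w.startswith(prefix) and prefix: prefix = prefix[:-1]   (prefix[:-1] = dropLast)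
def pvChopPre (w : List Char) (p : List Char) : List Char :=
  if PySem.Chars.startswith w p = false ∧ p ≠ [] then pvChopPre w p.dropLast else p
termination_by p.length
decreasing_by
  rename_i h
  have : p.length ≠ 0 := fun h0 => h.2 (List.eq_nil_of_length_eq_zero h0)
  simp [List.length_dropLast]; omega

-- for w in words[1:]: … ; if not prefix: break
def pvLcpLoopA (ws : List (List Char)) (p : List Char) : List Char :=
  match ws with
  | [] => p
  | w :: rest => let p' := pvChopPre w p; if p' = [] then p' else pvLcpLoopA rest p'

def pvLcpA (ws : List (List Char)) : List Char :=
  match ws with | [] => [] | w0 :: rest => pvLcpLoopA rest w0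

-- while not w.endswith(suffix) and suffix: suffix = suffix[1:]   (suffix[1:] = drop 1)
def pvChopSuf (w : List Char) (p : List Char) : List Char :=
  if PySem.Chars.endswith w p = false ∧ p ≠ [] then pvChopSuf w (p.drop 1) else p
termination_by p.length
decreasing_by
  rename_i h
  have : p.length ≠ 0 := fun h0 => h.2 (List.eq_nil_of_length_eq_zero h0)
  simp; omega

def pvLcsufLoopA (ws : List (List Char)) (p : List Char) : List Char :=
  match ws with
  | [] => p
  | w :: rest => let p' := pvChopSuf w p; if p' = [] then p' else pvLcsufLoopA rest p'

def pvLcsufA (ws : List (List Char)) : List Char :=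
  match ws with | [] => [] | w0 :: rest => pvLcsufLoopA rest w0

-- range(n, 0, -1) = [n, n-1, …, 1]  (exact: n is a Nat length)
def pvDescLens (n : Nat) : List Nat := (List.range n).map (fun i => n - i)

def pvAllContain (ws : List (List Char)) (cand : List Char) : Bool :=
  ws.all (fun w => PySem.Chars.isIn cand w)

-- inner loop of A's longest_common_substring for one candidate length:
-- for start in range(n - length + 1): cand = shortest[start:start+length]; if all(cand in w): return cand
-- (shortest[s:s+L] = (drop s).take L — exact for these non-negative bounds)
def pvFindStart (ws : List (List Char)) (sh : List Char) (n L : Nat) : Option (List Char) :=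
  (List.range (n - L + 1)).findSome? (fun s =>
    let cand := (sh.drop s).take L
    if pvAllContain ws cand then some cand else none)

def pvLcsA (ws : List (List Char)) : List Char :=
  match ws with
  | [] => []
  | _ :: _ =>
    match PySem.List.min? ws (fun w => (w.length : Int)) with
    | none => []   -- unreachable: ws ≠ []
    | some sh =>
      let n := sh.length
      ((pvDescLens n).findSome? (fun L => pvFindStart ws sh n L)).getD []

def pvPrio : PySem.Dict String Int :=
  PySem.Dict.ofList [("suffix", 2), ("prefix", 1), ("contains", 0)]

def choose_generalization (words : List String) : Option (String × String) :=
  if words.length < 2 ∨ words.any (fun w => PySem.Str.len w == 0) then none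
  else if (PySem.Set.ofList words).length == 1 then none
  else
    let ws := words.map String.toList
    let sufv := pvLcsufA ws
    let prev := pvLcpA ws
    let substring := pvLcsA ws
    let candidates : List (String × List Char) :=
      (if sufv ≠ [] then [("suffix", sufv)] else []) ++
      (if prev ≠ [] then [("prefix", prev)] else []) ++
      (if substring ≠ [] ∧ 2 ≤ substring.length then [("contains", substring)] else [])
    if candidates = [] then none
    else (PySem.List.max2? candidates (fun c => (c.2.length : Int)) (fun c => PySem.Dict.getD pvPrio c.1 0)).map
      (fun c => (c.1, String.ofList c.2))

-- ===== PORT B =====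

-- i = 0; while i < len(a) and i < len(b) and a[i] == b[i]: i += 1
def pvPrefLen : List Char → List Char → Nat
  | x :: xs, y :: ys => if x = y then pvPrefLen xs ys + 1 else 0
  | _, _ => 0

def pvPref2 (a b : List Char) : List Char := a.take (pvPrefLen a b)

def pvReducePref (ws : List (List Char)) : List Char :=
  match ws with | [] => [] | w0 :: rest => rest.foldl (fun p w => pvPref2 p w) w0

-- {w[s:s+L] for s in range(len(w)-L+1)}  (exact here: every call has 1 ≤ L ≤ len(w), so the bound stays positive)
def pvSubsSet (w : List Char) (L : Nat) : PySem.Set (List Char) :=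
  PySem.Set.ofList ((List.range (w.length - L + 1)).map (fun s => (w.drop s).take L))

def pvCommon (ws : List (List Char)) (sh : List Char) (L : Nat) : PySem.Set (List Char) :=
  ws.foldl (fun acc w => PySem.Set.inter acc (pvSubsSet w L)) (pvSubsSet sh L)

def pvLcsGo (ws : List (List Char)) (sh : List Char) (n : Nat) (L : Nat) (best : List Char) : List Char :=
  if _h : L ≤ n then
    match (List.range (n - L + 1)).findSome? (fun s =>
        let c := (sh.drop s).take L
        if PySem.Set.contains (pvCommon ws sh L) c then some c else none) with
    | some pick => pvLcsGo ws sh n (L + 1) pick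
    | none => best
  else best
termination_by n + 1 - L

def pvLcsB (ws : List (List Char)) : List Char :=
  match PySem.List.min? ws (fun w => (w.length : Int)) with
  | none => []   -- unreachable from choose_generalization_alt
  | some sh => pvLcsGo ws sh sh.length 1 []

def choose_generalization_alt (words : List String) : Option (String × String) :=
  match words with
  | w0 :: _ :: _ =>
    if words.any (fun w => w == "") ∨ words.all (fun w => w == w0) then none
    else
      let ws := words.map String.toList
      let sufv := (pvReducePref (ws.map List.reverse)).reverse
      let prev := pvReducePref ws
      let substring := pvLcsB ws
      let best := ([((2 : Int), ("suffix", sufv)), (1, ("prefix", prev)), (0, ("contains", substring))]).foldl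
        (fun best c =>
          if c.2.2 ≠ [] ∧ (c.2.1 ≠ "contains" ∨ 2 ≤ c.2.2.length) then
            match best with
            | none => some c
            | some b =>
              if b.2.2.length < c.2.2.length ∨ (c.2.2.length = b.2.2.length ∧ b.1 < c.1) then some c else best
          else best) none
      best.map (fun b => (b.2.1, String.ofList b.2.2))
  | _ => none

-- ===== PRECONDITION & SPEC =====
def Spec_choose_generalization (words : List String) (out : Option (String × String)) : Prop := out = choose_generalization_alt words
instance (words : List String) (out : Option (String × String)) : Decidable (Spec_choose_generalization words out) := by unfold Spec_choose_generalization; infer_instance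

-- ===== CLAIM (what is proved, stated in full; the proofs are below) =====
def Claim_equal_choose_generalization : Prop := ∀ (words : List String), Dom_choose_generalization words → Spec_choose_generalization words (choose_generalization words)

-- ===== LEMMAS AND PROOFS =====

theorem pvPrefLen_le (a b : List Char) : pvPrefLen a b ≤ a.length := by
  induction a generalizing b with
  | nil => simp [pvPrefLen]
  | cons x xs ih =>
    cases b with
    | nil => simp [pvPrefLen]
    | cons y ys =>
      simp only [pvPrefLen, List.length_cons]
      split
      · exact Nat.succ_le_succ (ih ys)
      · omega

theorem pvPrefLen_eq_iff (a b : List Char) : pvPrefLen a b = a.length ↔ a <+: b := by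
  induction a generalizing b with
  | nil => simp [pvPrefLen]
  | cons x xs ih =>
    cases b with
    | nil =>
      simp [pvPrefLen]
    | cons y ys =>
      simp only [pvPrefLen, List.length_cons, List.cons_prefix_cons]
      split
      · rename_i hxy
        constructor
        · intro h; exact ⟨hxy, (ih ys).mp (by omega)⟩
        · intro h; have := (ih ys).mpr h.2; omega
      · rename_i hxy
        constructor
        · intro h; omega
        · intro h; exact absurd h.1 hxy

theorem pvPrefLen_dropLast (a b : List Char) (h : pvPrefLen a b < a.length) :
    pvPrefLen a.dropLast b = pvPrefLen a b := by
  induction a generalizing b with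
  | nil => simp at h
  | cons x xs ih =>
    cases b with
    | nil =>
      cases xs with
      | nil => simp [pvPrefLen]
      | cons z zs => simp [pvPrefLen]
    | cons y ys =>
      by_cases hxy : x = y
      · have hlt : pvPrefLen xs ys < xs.length := by
          simp only [pvPrefLen, if_pos hxy, List.length_cons] at h; omega
        have hxs : xs ≠ [] := by
          intro h0; rw [h0] at hlt; simp [pvPrefLen] at hlt
        rw [List.dropLast_cons_of_ne_nil hxs]
        simp only [pvPrefLen, if_pos hxy]
        rw [ih ys hlt]
      · cases xs with
        | nil => simp [pvPrefLen, hxy]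
        | cons z zs =>
          rw [List.dropLast_cons_of_ne_nil (by simp)]
          simp [pvPrefLen, hxy]

theorem pvChopPre_eq (w p : List Char) : pvChopPre w p = pvPref2 p w := by
  induction hn : p.length using Nat.strong_induction_on generalizing p with
  | _ n ih =>
  subst hn
  rw [pvChopPre]
  by_cases hsw : PySem.Chars.startswith w p = false ∧ p ≠ []
  · rw [if_pos hsw]
    have hnp : ¬ p <+: w := by
      intro hp
      rw [(PySem.Chars.startswith_iff w p).mpr hp] at hsw
      exact absurd hsw.1 (by simp)
    have hlt : pvPrefLen p w < p.length := by
      have := pvPrefLen_le p w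
      rcases Nat.lt_or_ge (pvPrefLen p w) p.length with h | h
      · exact h
      · exact absurd ((pvPrefLen_eq_iff p w).mp (le_antisymm this h)) hnp
    have hplen : 0 < p.length := List.length_pos_of_ne_nil hsw.2
    rw [ih p.dropLast.length (by simp [List.length_dropLast]; omega) p.dropLast rfl]
    unfold pvPref2
    rw [pvPrefLen_dropLast p w hlt, List.dropLast_eq_take, List.take_take]
    congr 1
    omega
  · rw [if_neg hsw]
    rcases not_and_or.mp hsw with h | h
    · have hpw : p <+: w := (PySem.Chars.startswith_iff w p).mp (by
        cases hb : PySem.Chars.startswith w p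
        · exact absurd hb h
        · rfl)
      unfold pvPref2
      rw [(pvPrefLen_eq_iff p w).mpr hpw, List.take_length]
    · have : p = [] := not_not.mp h
      subst this; simp [pvPref2, pvPrefLen]

theorem pvFoldPref_nil (ws : List (List Char)) :
    ws.foldl (fun p w => pvPref2 p w) [] = [] := by
  induction ws with
  | nil => rfl
  | cons w rest ih => simpa [pvPref2, pvPrefLen] using ih

theorem pvLcpLoopA_eq (ws : List (List Char)) (p : List Char) :
    pvLcpLoopA ws p = ws.foldl (fun p w => pvPref2 p w) p := by
  induction ws generalizing p with
  | nil => rfl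
  | cons w rest ih =>
    simp only [pvLcpLoopA, pvChopPre_eq, List.foldl_cons]
    split
    · rename_i h
      rw [h, pvFoldPref_nil]
    · exact ih _

theorem pvChopSuf_eq (w p : List Char) : pvChopSuf w p = (pvChopPre w.reverse p.reverse).reverse := by
  induction hn : p.length using Nat.strong_induction_on generalizing p with
  | _ n ih =>
  subst hn
  rw [pvChopSuf, pvChopPre]
  have hse : PySem.Chars.startswith w.reverse p.reverse = PySem.Chars.endswith w p := by
    cases hb : PySem.Chars.endswith w p
    · cases hb2 : PySem.Chars.startswith w.reverse p.reverse
      · rfl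
      · have := (PySem.Chars.startswith_iff _ _).mp hb2
        rw [List.reverse_prefix] at this
        rw [(PySem.Chars.endswith_iff w p).mpr this] at hb
        exact hb
    · have := (PySem.Chars.endswith_iff w p).mp hb
      exact (PySem.Chars.startswith_iff _ _).mpr (List.reverse_prefix.mpr this)
  rw [hse]
  by_cases hc : PySem.Chars.endswith w p = false ∧ p ≠ []
  · rw [if_pos hc, if_pos (by simpa using hc)]
    have hplen : 0 < p.length := List.length_pos_of_ne_nil hc.2
    rw [ih (p.drop 1).length (by simp; omega) _ rfl]
    congr 2
    rw [List.drop_one, ← List.dropLast_reverse]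
  · rw [if_neg hc, if_neg (by simpa using hc), List.reverse_reverse]

theorem pvLcsufLoopA_eq (ws : List (List Char)) (p : List Char) :
    pvLcsufLoopA ws p = ((ws.map List.reverse).foldl (fun q w => pvPref2 q w) p.reverse).reverse := by
  induction ws generalizing p with
  | nil => simp [pvLcsufLoopA]
  | cons w rest ih =>
    simp only [pvLcsufLoopA, pvChopSuf_eq, pvChopPre_eq, List.map_cons, List.foldl_cons]
    split
    · rename_i h
      have h2 : pvPref2 p.reverse w.reverse = [] := by
        have := congrArg List.reverse h
        simpa using this
      rw [h2, pvFoldPref_nil]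
    · rename_i h
      rw [ih ((pvPref2 p.reverse w.reverse).reverse)]
      rw [List.reverse_reverse]

theorem pvMemFoldInter (ws : List (List Char)) (L : Nat) (init : PySem.Set (List Char)) (x : List Char) :
    x ∈ ws.foldl (fun acc w => PySem.Set.inter acc (pvSubsSet w L)) init ↔
      x ∈ init ∧ ∀ w ∈ ws, x ∈ pvSubsSet w L := by
  induction ws generalizing init with
  | nil => simp
  | cons w rest ih =>
    simp only [List.foldl_cons, ih, PySem.Set.mem_inter, List.mem_cons]
    constructor
    · rintro ⟨⟨h1, h2⟩, h3⟩
      refine ⟨h1, fun v hv => ?_⟩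
      rcases hv with rfl | hv
      · exact h2
      · exact h3 v hv
    · rintro ⟨h1, h2⟩
      exact ⟨⟨h1, h2 w (Or.inl rfl)⟩, fun v hv => h2 v (Or.inr hv)⟩

theorem pvMem_subsSet (w x : List Char) (L : Nat) (h1 : 1 ≤ L) (h2 : L ≤ w.length) :
    x ∈ pvSubsSet w L ↔ (x.length = L ∧ PySem.Chars.isIn x w = true) := by
  rw [pvSubsSet, PySem.Set.mem_ofList, List.mem_map]
  constructor
  · rintro ⟨s, hs, rfl⟩
    rw [List.mem_range] at hs
    refine ⟨by simp; omega, ?_⟩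
    rw [← PySem.Chars.exists_prefix_drop_iff_isIn]
    exact ⟨s, List.take_prefix _ _⟩
  · rintro ⟨hlen, hin⟩
    rw [← PySem.Chars.exists_prefix_drop_iff_isIn] at hin
    obtain ⟨j, hj⟩ := hin
    have hjl : x.length ≤ (w.drop j).length := hj.length_le
    simp at hjl
    refine ⟨j, by rw [List.mem_range]; omega, ?_⟩
    have := List.prefix_iff_eq_take.mp hj
    rw [← hlen]
    exact this.symm

theorem pvIsIn_of_prefix {x y w : List Char} (hxy : x <+: y) (h : PySem.Chars.isIn y w = true) :
    PySem.Chars.isIn x w = true := by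
  rw [← PySem.Chars.exists_prefix_drop_iff_isIn] at h ⊢
  obtain ⟨j, hj⟩ := h
  exact ⟨j, hxy.trans hj⟩

theorem pvContains_eq_all (ws : List (List Char)) (sh : List Char) (L : Nat)
    (hsh : sh ∈ ws) (hwlen : ∀ w ∈ ws, sh.length ≤ w.length)
    (hL1 : 1 ≤ L) (hLn : L ≤ sh.length) (s : Nat) (hs : s < sh.length - L + 1) :
    PySem.Set.contains (pvCommon ws sh L) ((sh.drop s).take L) = pvAllContain ws ((sh.drop s).take L) := by
  have hcl : ((sh.drop s).take L).length = L := by simp; omega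
  rw [Bool.eq_iff_iff, PySem.Set.contains_iff, pvCommon, pvMemFoldInter, pvAllContain, List.all_eq_true]
  constructor
  · rintro ⟨_, h2⟩ w hw
    exact ((pvMem_subsSet w _ L hL1 (le_trans hLn (hwlen w hw))).mp (h2 w hw)).2
  · intro h
    refine ⟨?_, fun w hw => (pvMem_subsSet w _ L hL1 (le_trans hLn (hwlen w hw))).mpr ⟨hcl, h w hw⟩⟩
    exact (pvMem_subsSet sh _ L hL1 hLn).mpr ⟨hcl, h sh hsh⟩

theorem pvFindSome?_congr {α β : Type} (l : List α) (f g : α → Option β)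
    (h : ∀ x ∈ l, f x = g x) : l.findSome? f = l.findSome? g := by
  induction l with
  | nil => rfl
  | cons a t ih =>
    rw [List.findSome?_cons, List.findSome?_cons, h a (by simp)]
    cases g a with
    | some v => rfl
    | none => exact ih (fun x hx => h x (by simp [hx]))

theorem pvFindStart_none_up (ws : List (List Char)) (sh : List Char) (n : Nat)
    (hn : n = sh.length)
    (hL : ∀ L, 1 ≤ L → L + 1 ≤ n → pvFindStart ws sh n L = none → pvFindStart ws sh n (L + 1) = none) :
    ∀ L j, 1 ≤ L → L ≤ j → j ≤ n → pvFindStart ws sh n L = none → pvFindStart ws sh n j = none := by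
  intro L j h1 hLj hjn hnone
  induction j with
  | zero => omega
  | succ k ih =>
    rcases Nat.lt_or_ge L (k + 1) with h | h
    · exact hL k (by omega) (by omega) (ih (by omega) (by omega))
    · have : L = k + 1 := by omega
      rw [← this]; exact hnone

theorem pvFindStart_mono (ws : List (List Char)) (sh : List Char) (n : Nat)
    (hn : n = sh.length) (L : Nat) (h1 : 1 ≤ L) (h2 : L + 1 ≤ n)
    (hnone : pvFindStart ws sh n L = none) : pvFindStart ws sh n (L + 1) = none := by
  rw [pvFindStart, List.findSome?_eq_none_iff] at hnone ⊢
  intro s hs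
  rw [List.mem_range] at hs
  simp only []
  by_cases hall : pvAllContain ws ((sh.drop s).take (L + 1)) = true
  · exfalso
    have hmem : s ∈ List.range (n - L + 1) := by rw [List.mem_range]; omega
    have := hnone s hmem
    have hpref : (sh.drop s).take L <+: (sh.drop s).take (L + 1) := by
      have he : (sh.drop s).take L = ((sh.drop s).take (L + 1)).take L := by
        rw [List.take_take]; congr 1; omega
      rw [he]
      exact List.take_prefix _ _
    have hallL : pvAllContain ws ((sh.drop s).take L) = true := by
      rw [pvAllContain, List.all_eq_true] at hall ⊢
      exact fun w hw => pvIsIn_of_prefix hpref (hall w hw)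
    simp [hallL] at this
  · simp [hall]

def pvDescFrom (n L : Nat) : List Nat := (List.range (n + 1 - L)).map (fun i => n - i)

theorem pvDescFrom_one (n : Nat) : pvDescLens n = pvDescFrom n 1 := by
  simp [pvDescLens, pvDescFrom]

theorem pvDescFrom_empty (n L : Nat) (h : n < L) : pvDescFrom n L = [] := by
  have : n + 1 - L = 0 := by omega
  simp [pvDescFrom, this]

theorem pvDescFrom_append (n L : Nat) (h : L ≤ n) : pvDescFrom n L = pvDescFrom n (L + 1) ++ [L] := by
  have h1 : n + 1 - L = (n - L) + 1 := by omega
  have h2 : n + 1 - (L + 1) = n - L := by omega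
  rw [pvDescFrom, pvDescFrom, h1, h2, List.range_succ, List.map_append]
  simp
  omega

theorem pvDescFrom_mem (n L j : Nat) (h : j ∈ pvDescFrom n L) : L ≤ j ∧ j ≤ n := by
  rw [pvDescFrom, List.mem_map] at h
  obtain ⟨i, hi, rfl⟩ := h
  rw [List.mem_range] at hi
  omega

theorem pvGo_eq (ws : List (List Char)) (sh : List Char) (n : Nat)
    (hn : n = sh.length) (hsh : sh ∈ ws) (hwlen : ∀ w ∈ ws, sh.length ≤ w.length) :
    ∀ L best, 1 ≤ L →
      pvLcsGo ws sh n L best = ((pvDescFrom n L).findSome? (fun j => pvFindStart ws sh n j)).getD best := by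
  intro L best hL1
  induction hm : n + 1 - L using Nat.strong_induction_on generalizing L best with
  | _ m ih =>
  subst hm
  rw [pvLcsGo]
  by_cases hLn : L ≤ n
  · rw [dif_pos hLn]
    have hinner : (List.range (n - L + 1)).findSome? (fun s =>
        let c := (sh.drop s).take L
        if PySem.Set.contains (pvCommon ws sh L) c then some c else none) = pvFindStart ws sh n L := by
      rw [pvFindStart]
      apply pvFindSome?_congr
      intro s hs
      rw [List.mem_range] at hs
      simp only []
      rw [pvContains_eq_all ws sh L hsh hwlen hL1 (by omega) s (by omega)]
    rw [hinner]
    rw [pvDescFrom_append n L hLn, List.findSome?_append]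
    cases hF : pvFindStart ws sh n L with
    | some pick =>
      show pvLcsGo ws sh n (L + 1) pick = _
      rw [ih (n + 1 - (L + 1)) (by omega) (L + 1) pick (by omega) rfl]
      cases hrest : (pvDescFrom n (L + 1)).findSome? (fun j => pvFindStart ws sh n j) with
      | some d => simp [hrest]
      | none => simp [hrest, hF]
    | none =>
      have hrest : (pvDescFrom n (L + 1)).findSome? (fun j => pvFindStart ws sh n j) = none := by
        rw [List.findSome?_eq_none_iff]
        intro j hj
        have := pvDescFrom_mem n (L + 1) j hj
        exact pvFindStart_none_up ws sh n hn
          (fun L' h1' h2' hnone' => pvFindStart_mono ws sh n hn L' h1' h2' hnone')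
          L j hL1 (by omega) (by omega) hF
      show best = _
      simp [hrest, hF]
  · rw [dif_neg hLn, pvDescFrom_empty n L (by omega)]
    rfl

theorem pvLcs_eq (ws : List (List Char)) : pvLcsA ws = pvLcsB ws := by
  cases ws with
  | nil => rfl
  | cons w rest =>
    rw [pvLcsA, pvLcsB]
    cases hmin : PySem.List.min? (w :: rest) (fun w => (w.length : Int)) with
    | none =>
      exact absurd ((PySem.List.min?_eq_none_iff _ _).mp hmin) (by simp)
    | some sh =>
      show ((pvDescLens sh.length).findSome? (fun L => pvFindStart (w :: rest) sh sh.length L)).getD [] = pvLcsGo (w :: rest) sh sh.length 1 []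
      have hsh : sh ∈ w :: rest := PySem.List.min?_mem hmin
      have hwlen : ∀ v ∈ w :: rest, sh.length ≤ v.length := by
        intro v hv
        have := PySem.List.min?_isMin hmin v hv
        exact_mod_cast this
      rw [pvGo_eq (w :: rest) sh sh.length rfl hsh hwlen 1 [] (by omega), pvDescFrom_one]

theorem pvSetLen_one (words : List String) (a : String) (h : a ∈ words) :
    (PySem.Set.ofList words).length = 1 ↔ ∀ x ∈ words, x = a := by
  constructor
  · intro h1
    obtain ⟨y, hy⟩ := List.length_eq_one_iff.mp h1
    intro x hx
    have hxy : x = y := by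
      have : x ∈ PySem.Set.ofList words := (PySem.Set.mem_ofList _ _).mpr hx
      rw [hy] at this; simpa using this
    have hay : a = y := by
      have : a ∈ PySem.Set.ofList words := (PySem.Set.mem_ofList _ _).mpr h
      rw [hy] at this; simpa using this
    rw [hxy, hay]
  · intro hall
    have : PySem.Set.ofList words = [a] := by
      cases words with
      | nil => simp at h
      | cons x rest =>
        have hx : x = a := hall x (by simp)
        rw [PySem.Set.ofList_cons, hx]
        have : PySem.Set.discard (PySem.Set.ofList rest) a = [] := by
          rw [List.eq_nil_iff_forall_not_mem]
          intro y hy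
          rw [PySem.Set.mem_discard] at hy
          exact hy.2 (hall y (by simp [(PySem.Set.mem_ofList _ _).mp hy.1]))
        rw [this]
    rw [this]
    rfl

theorem pvSelect_eq (S P C : List Char) :
    (let candidates : List (String × List Char) :=
      (if S ≠ [] then [("suffix", S)] else []) ++
      (if P ≠ [] then [("prefix", P)] else []) ++
      (if C ≠ [] ∧ 2 ≤ C.length then [("contains", C)] else []);
    if candidates = [] then none
    else (PySem.List.max2? candidates (fun c => (c.2.length : Int)) (fun c => PySem.Dict.getD pvPrio c.1 0)).map
      (fun c => (c.1, String.ofList c.2)))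
    = (([((2 : Int), ("suffix", S)), (1, ("prefix", P)), (0, ("contains", C))]).foldl
        (fun best c =>
          if c.2.2 ≠ [] ∧ (c.2.1 ≠ "contains" ∨ 2 ≤ c.2.2.length) then
            match best with
            | none => some c
            | some b =>
              if b.2.2.length < c.2.2.length ∨ (c.2.2.length = b.2.2.length ∧ b.1 < c.1) then some c else best
          else best) none).map (fun b => (b.2.1, String.ofList b.2.2)) := by
  have hps : ("prefix" : String) ≠ "suffix" := by decide
  have hcs : ("contains" : String) ≠ "suffix" := by decide
  have hcp : ("contains" : String) ≠ "prefix" := by decide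
  have g1 : PySem.Dict.getD pvPrio "suffix" 0 = 2 := by decide
  have g2 : PySem.Dict.getD pvPrio "prefix" 0 = 1 := by decide
  have g3 : PySem.Dict.getD pvPrio "contains" 0 = 0 := by decide
  by_cases hS : S = [] <;> by_cases hP : P = [] <;> by_cases hC : C ≠ [] ∧ 2 ≤ C.length <;>
    simp only [hS, hP, hC, ne_eq, not_true_eq_false, not_false_eq_true, if_true, if_false,
      ite_true, ite_false, if_pos, List.nil_append, List.append_nil, List.foldl_cons, List.foldl_nil,
      PySem.List.max2?, g1, g2, g3, hps, hcs, hcp] <;>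
    simp [PySem.List.max2?, g1, g2, g3, hC] <;>
    split_ifs <;> simp_all <;> first | omega | (split_ifs <;> rfl)

theorem pvLcpA_eq (ws : List (List Char)) : pvLcpA ws = pvReducePref ws := by
  cases ws with
  | nil => rfl
  | cons w0 rest => exact pvLcpLoopA_eq rest w0

theorem pvLcsufA_eq (ws : List (List Char)) :
    pvLcsufA ws = (pvReducePref (ws.map List.reverse)).reverse := by
  cases ws with
  | nil => rfl
  | cons w0 rest =>
    rw [pvLcsufA, pvLcsufLoopA_eq, List.map_cons, pvReducePref]

theorem pvLen0 (w : String) : (PySem.Str.len w == 0) = (w == "") := by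
  rw [Bool.eq_iff_iff, beq_iff_eq, beq_iff_eq]
  simp [pysem, String.toList_eq_nil_iff]

theorem pv_main (words : List String) : choose_generalization words = choose_generalization_alt words := by
  match words with
  | [] => rfl
  | [w] => rfl
  | w0 :: w1 :: rest =>
    simp only [choose_generalization, choose_generalization_alt]
    have hlen2 : ¬ (w0 :: w1 :: rest).length < 2 := by simp
    have hany : (w0 :: w1 :: rest).any (fun w => PySem.Str.len w == 0)
        = (w0 :: w1 :: rest).any (fun w => w == "") := by
      simp only [pvLen0]
    by_cases hempty : (w0 :: w1 :: rest).any (fun w => w == "") = true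
    · rw [if_pos (by rw [hany]; exact Or.inr hempty), if_pos (Or.inl hempty)]
    · by_cases hall : (w0 :: w1 :: rest).all (fun w => w == w0) = true
      · have h1 : ∀ x ∈ (w0 :: w1 :: rest), x = w0 := by
          intro x hx
          have := List.all_eq_true.mp hall x hx
          exact beq_iff_eq.mp this
        rw [if_neg (by rw [hany]; push_neg; exact ⟨by simpa using hlen2, fun h => hempty h⟩)]
        rw [if_pos (by
          rw [beq_iff_eq]
          exact (pvSetLen_one (w0 :: w1 :: rest) w0 (by simp)).mpr h1)]
        rw [if_pos (Or.inr hall)]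
      · have hnall : ¬ ((w0 :: w1 :: rest).any (fun w => w == "") = true ∨
            (w0 :: w1 :: rest).all (fun w => w == w0) = true) := by
          push_neg
          exact ⟨hempty, hall⟩
        rw [if_neg (by rw [hany]; push_neg; exact ⟨by simpa using hlen2, fun h => hempty h⟩)]
        rw [if_neg (by
          rw [beq_iff_eq]
          intro hcon
          exact hall (List.all_eq_true.mpr (fun x hx =>
            beq_iff_eq.mpr ((pvSetLen_one (w0 :: w1 :: rest) w0 (by simp)).mp hcon x hx))))]
        rw [if_neg hnall]
        simp only [pvLcsufA_eq, pvLcpA_eq, pvLcs_eq]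
        exact pvSelect_eq
          (pvReducePref (((w0 :: w1 :: rest).map String.toList).map List.reverse)).reverse
          (pvReducePref ((w0 :: w1 :: rest).map String.toList))
          (pvLcsB ((w0 :: w1 :: rest).map String.toList))

-- ===== VERDICT (by name: the statement is the Claim_ definition above) =====
theorem choose_generalization_spec : Claim_equal_choose_generalization := by
  intro words _
  unfold Spec_choose_generalization
  exact pv_main words
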